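-- pv_equiv track=rewrite | github.com/surinkwon/TIL | python/Programmers/level 1/부족한 금액 계산하기.py | solution
-- ===== SOURCE A (Python) =====
-- def solution(price, money, count):
--     total_price = 0
--
--     for n in range(1, count + 1):
--         total_price += price * n
--
--     answer = total_price - money
--
--     if answer < 0:
--         answer = 0
--
--     return answer
-- ===== SOURCE B (Python) =====
-- def solution(price, money, count):
--     n = count if count > 0 else 0
--     return max(price * n * (n + 1) // 2 - money, 0)
-- ===== Notes on version B (the rewrite author's own statement) =====
-- stated objective: faster
-- what changed: Replaces the O(count) summation loop with the closed-form arithmetic-series formula price*n*(n+1)//2 and max() for the clamping.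
import Mathlib
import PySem

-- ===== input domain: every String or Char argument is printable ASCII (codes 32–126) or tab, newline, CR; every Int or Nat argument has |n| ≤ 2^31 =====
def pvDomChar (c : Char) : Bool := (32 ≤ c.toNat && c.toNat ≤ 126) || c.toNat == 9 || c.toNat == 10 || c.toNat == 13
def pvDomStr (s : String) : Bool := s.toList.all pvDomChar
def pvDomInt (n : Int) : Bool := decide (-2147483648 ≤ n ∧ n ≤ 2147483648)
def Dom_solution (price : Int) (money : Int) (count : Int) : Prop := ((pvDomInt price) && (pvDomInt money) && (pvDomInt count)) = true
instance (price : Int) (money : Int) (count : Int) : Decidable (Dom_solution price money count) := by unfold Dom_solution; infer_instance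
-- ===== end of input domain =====

-- B replaces A's O(count) summation loop with the closed-form series formula price*n*(n+1)//2 (O(1)).


-- ===== PORT A =====
def solution (price : Int) (money : Int) (count : Int) : Int :=
  let total_price := (PySem.List.pyRange 1 (count + 1) 1).foldl (fun acc n => acc + price * n) 0
  let answer := total_price - money
  if answer < 0 then 0 else answer

-- ===== PORT B =====
def solution_alt (price : Int) (money : Int) (count : Int) : Int :=
  let n := if count > 0 then count else 0
  max (PySem.Int.floordiv (price * n * (n + 1)) 2 - money) 0

-- ===== PRECONDITION & SPEC =====
def Spec_solution (price : Int) (money : Int) (count : Int) (out : Int) : Prop := out = solution_alt price money count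
instance (price : Int) (money : Int) (count : Int) (out : Int) : Decidable (Spec_solution price money count out) := by unfold Spec_solution; infer_instance

-- ===== CLAIM (what is proved, stated in full; the proofs are below) =====
def Claim_equal_solution : Prop := ∀ (price : Int) (money : Int) (count : Int), Dom_solution price money count → Spec_solution price money count (solution price money count)

-- ===== LEMMAS AND PROOFS =====

-- shifting the accumulator out of A's loop
theorem foldl_shift (price : Int) : ∀ (l : List Int) (a : Int),
    l.foldl (fun acc n => acc + price * n) a = a + l.foldl (fun acc n => acc + price * n) 0 := by
  intro l
  induction l with
  | nil => intro a; simp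
  | cons x xs ih =>
      intro a
      simp only [List.foldl_cons]
      rw [ih (a + price * x), ih (0 + price * x)]
      ring

-- doubled closed form of A's loop over range m
theorem sum_aux (price : Int) : ∀ (m : ℕ),
    ((List.range m).map (fun k : ℕ => (1 : Int) + (k : Int))).foldl (fun acc n => acc + price * n) 0 * 2
      = price * m * (m + 1) := by
  intro m
  induction m with
  | zero => simp
  | succ m ih =>
      rw [List.range_succ]
      simp only [List.map_append, List.map_cons, List.map_nil, List.foldl_append,
        List.foldl_cons, List.foldl_nil]
      rw [foldl_shift]
      push_cast
      nlinarith [ih]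

theorem solution_eq (price money count : Int) :
    solution price money count = solution_alt price money count := by
  unfold solution solution_alt
  rw [PySem.List.pyRange_one]
  by_cases h : count > 0
  · simp only [if_pos h, add_sub_cancel_right]
    have hm : (count.toNat : Int) = count := Int.toNat_of_nonneg (le_of_lt h)
    have hs := sum_aux price count.toNat
    rw [hm] at hs
    set S := ((List.range count.toNat).map (fun k : ℕ => (1 : Int) + (k : Int))).foldl
        (fun acc n => acc + price * n) 0 with hS
    have : price * count * (count + 1) = 2 * S := by linarith
    rw [this, PySem.Int.floordiv_eq_ediv_of_pos (by norm_num : (0:Int) < 2),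
      Int.mul_ediv_cancel_left _ (by norm_num : (2:Int) ≠ 0)]
    omega
  · have : (count + 1 - 1).toNat = 0 := by omega
    rw [this]
    simp only [List.range_zero, List.map_nil, List.foldl_nil, if_neg h]
    rw [PySem.Int.floordiv_eq_ediv_of_pos (by norm_num : (0:Int) < 2)]
    simp only [mul_zero, zero_mul, Int.zero_ediv]
    omega

-- ===== VERDICT (by name: the statement is the Claim_ definition above) =====
theorem solution_spec : Claim_equal_solution := by
  intro price money count _
  exact solution_eq price money count
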